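-- pv_equiv track=rewrite | github.com/Frederic7101/Foncier | reconcile_usage_transcripts.py | deduplicate_turns
-- ===== SOURCE A (Python) =====
-- def deduplicate_turns(turns):
--     """
--     Filtrage des tours :
--
--     - Supprime TOUS les tours sans réponse (assistant == "").
--     - Pour les tours avec réponse, ne dédoublonne que les doublons consécutifs
--       (même user + même assistant) pour éviter un éventuel bug de transcript.
--     """
--     cleaned = []
--     last_full_key = None
--
--     for t in turns:
--         user_text = (t.get("user", "") or "").strip()
--         assistant_text = (t.get("assistant", "") or "").strip()
--
--         # On ignore tous les tours sans réponse assistant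
--         if not assistant_text:
--             continue
--
--         full_key = (user_text, assistant_text)
--         if full_key == last_full_key:
--             # Même tour complet répété juste après : on le saute
--             continue
--
--         cleaned.append({"user": user_text, "assistant": assistant_text})
--         last_full_key = full_key
--
--     return cleaned
-- ===== SOURCE B (Python) =====
-- def deduplicate_turns(turns):
--     def key(t):
--         return ((t.get("user", "") or "").strip(),
--                 (t.get("assistant", "") or "").strip())
--
--     keys = [k for k in map(key, turns) if k[1]]
--
--     def emit(ks):
--         # recursion over maximal runs: emit the run's head, skip the rest of the run
--         if not ks:
--             return []
--         head = ks[0]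
--         i = 0
--         while i < len(ks) and ks[i] == head:
--             i += 1
--         return [{"user": head[0], "assistant": head[1]}] + emit(ks[i:])
--
--     return emit(keys)
-- ===== Notes on version B (the rewrite author's own statement) =====
-- stated objective: alternative
-- what changed: A's single stateful scan with a last_full_key accumulator is replaced by a two-stage design: first extract the filtered list of stripped key pairs, then a recursion over MAXIMAL RUNS that emits each run's head and skips the whole run (no last-seen state carried across iterations).
import Mathlib
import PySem

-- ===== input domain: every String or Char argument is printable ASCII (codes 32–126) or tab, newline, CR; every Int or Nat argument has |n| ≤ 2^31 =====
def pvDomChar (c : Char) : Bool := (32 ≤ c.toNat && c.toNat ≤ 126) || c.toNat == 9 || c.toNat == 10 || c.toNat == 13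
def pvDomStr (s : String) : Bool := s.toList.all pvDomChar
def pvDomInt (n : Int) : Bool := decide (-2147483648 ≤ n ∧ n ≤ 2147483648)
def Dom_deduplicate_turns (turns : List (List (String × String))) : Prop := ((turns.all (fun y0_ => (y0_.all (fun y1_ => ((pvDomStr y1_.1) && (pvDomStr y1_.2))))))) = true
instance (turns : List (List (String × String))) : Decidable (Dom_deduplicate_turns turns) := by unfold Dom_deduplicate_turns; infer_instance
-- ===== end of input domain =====

-- B replaces A's single stateful last-key scan by a run-skipping recursion over the filtered key list; return value only, neither mutates its argument.

-- ===== PORT A =====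
-- shared low-level primitive: t.get(k, d) on an association-list dict (first match)
def pvAssocGetD (t : List (String × String)) (k : String) (d : String) : String :=
  match t.find? (fun p => p.1 == k) with
  | some p => p.2
  | none => d

-- one iteration of A's for-loop; state = (cleaned, last_full_key)
def pvStepA (st : List (List (String × String)) × Option (String × String))
    (t : List (String × String)) :
    List (List (String × String)) × Option (String × String) :=
  let u0 := pvAssocGetD t "user" ""                      -- t.get("user", "")
  let user_text := PySem.Str.strip (if u0 = "" then "" else u0)   -- (… or "").strip()
  let a0 := pvAssocGetD t "assistant" ""
  let assistant_text := PySem.Str.strip (if a0 = "" then "" else a0)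
  if assistant_text = "" then st                          -- continue
  else
    let full_key := (user_text, assistant_text)
    if some full_key = st.2 then st                       -- continue
    else (st.1 ++ [[("user", user_text), ("assistant", assistant_text)]], some full_key)

def deduplicate_turns (turns : List (List (String × String))) : List (List (String × String)) :=
  (turns.foldl pvStepA ([], none)).1

-- ===== PORT B =====
-- Source B's key(t)
def pvKeyB (t : List (String × String)) : String × String :=
  (PySem.Str.strip (let u0 := pvAssocGetD t "user" ""; if u0 = "" then "" else u0),
   PySem.Str.strip (let a0 := pvAssocGetD t "assistant" ""; if a0 = "" then "" else a0))

-- Source B's emit: the inner while loop advances i over the maximal run equal to head,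
-- i.e. it skips dropWhile (· == head); exact for that loop.
def pvEmit : List (String × String) → List (List (String × String))
  | [] => []
  | head :: ks =>
      [("user", head.1), ("assistant", head.2)] :: pvEmit (ks.dropWhile (fun k => k == head))
termination_by ks => ks.length
decreasing_by
  simpa using Nat.lt_succ_of_le (List.length_dropWhile_le _ _)

def deduplicate_turns_alt (turns : List (List (String × String))) : List (List (String × String)) :=
  pvEmit ((turns.map pvKeyB).filter (fun k => k.2 ≠ ""))

-- ===== PRECONDITION & SPEC =====
def Spec_deduplicate_turns (turns : List (List (String × String))) (out : List (List (String × String))) : Prop := out = deduplicate_turns_alt turns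
instance (turns : List (List (String × String))) (out : List (List (String × String))) : Decidable (Spec_deduplicate_turns turns out) := by unfold Spec_deduplicate_turns; infer_instance

-- ===== CLAIM (what is proved, stated in full; the proofs are below) =====
def Claim_equal_deduplicate_turns : Prop := ∀ (turns : List (List (String × String))), Dom_deduplicate_turns turns → Spec_deduplicate_turns turns (deduplicate_turns turns)

-- ===== LEMMAS AND PROOFS =====

def pvMk (k : String × String) : List (String × String) :=
  [("user", k.1), ("assistant", k.2)]

-- consecutive dedup with a "last emitted key" accumulator (A's shape)
def pvD : List (String × String) → Option (String × String) → List (List (String × String))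
  | [], _ => []
  | k :: ks, last => if some k = last then pvD ks last else pvMk k :: pvD ks (some k)

lemma pv_or_strip (s : String) : PySem.Str.strip (if s = "" then "" else s) = PySem.Str.strip s := by
  by_cases h : s = "" <;> simp [h]

lemma pvStepA_eq (st : List (List (String × String)) × Option (String × String))
    (t : List (String × String)) :
    pvStepA st t =
      if (pvKeyB t).2 = "" then st
      else if some (pvKeyB t) = st.2 then st
      else (st.1 ++ [pvMk (pvKeyB t)], some (pvKeyB t)) := by
  simp [pvStepA, pvKeyB, pvMk, pv_or_strip]

lemma pv_foldA (turns : List (List (String × String)))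
    (acc : List (List (String × String))) (last : Option (String × String)) :
    (turns.foldl pvStepA (acc, last)).1 =
      acc ++ pvD ((turns.map pvKeyB).filter (fun k => decide (k.2 ≠ ""))) last := by
  induction turns generalizing acc last with
  | nil => simp [pvD]
  | cons t ts ih =>
    simp only [List.foldl_cons, pvStepA_eq, List.map_cons, List.filter_cons]
    by_cases h2 : (pvKeyB t).2 = ""
    · simp [h2, ih]
    · by_cases hl : some (pvKeyB t) = last
      · simp [h2, hl, pvD, ih]
      · simp [h2, hl, pvD, ih]

-- A's accumulator dedup with last = some k equals B's emit after dropping k's run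
lemma pvD_some (xs : List (String × String)) (k : String × String) :
    pvD xs (some k) = pvEmit (xs.dropWhile (fun x => x == k)) := by
  induction xs generalizing k with
  | nil => simp [pvD, pvEmit]
  | cons h t ih =>
    by_cases hk : h = k
    · subst hk
      simp [pvD, List.dropWhile_cons, ih]
    · have : (h == k) = false := by simp [hk]
      simp [pvD, List.dropWhile_cons, this, hk, pvEmit, pvMk, ih]

lemma pvD_none (xs : List (String × String)) :
    pvD xs none = pvEmit xs := by
  cases xs with
  | nil => simp [pvD, pvEmit]
  | cons h t => simp [pvD, pvEmit, pvMk, pvD_some]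

-- ===== VERDICT (by name: the statement is the Claim_ definition above) =====
theorem deduplicate_turns_spec : Claim_equal_deduplicate_turns := by
  intro turns _
  show deduplicate_turns turns = deduplicate_turns_alt turns
  rw [deduplicate_turns, pv_foldA, pvD_none, deduplicate_turns_alt]
  simp
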